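-- pv_equiv track=rewrite | github.com/vipinsaini27/DSAlgo | Day 20 - Problem Solving 2/Count ways to make sum of odd and even indexed elements equal by removing an array element.py | solve
-- ===== SOURCE A (Python) =====
-- def solve(A):
--     evenSum, oddSum = 0, 0
--     ans = 0
--     for i in range(0, len(A)):
--         if i % 2 == 0:
--             evenSum += A[i]
--         else:
--             oddSum += A[i]
--
--     Lodd, Leven = 0, 0
--     for i in range(0, len(A)):
--         Rodd = evenSum - Leven
--         Reven = oddSum - Lodd
--
--         if i % 2 == 0:
--             Rodd -= A[i]
--         else:
--             Reven -= A[i]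
--
--         if Lodd + Rodd == Leven + Reven:
--             ans += 1
--
--         if i % 2 == 0:
--             Leven += A[i]
--         else:
--             Lodd += A[i]
--
--     return ans
-- ===== SOURCE B (Python) =====
-- def solve(A):
--     # Brute force straight from the problem statement: for each index i, build
--     # the array with A[i] removed and compare its even- and odd-position sums.
--     def balanced(B):
--         return sum(B[0::2]) == sum(B[1::2])
--     return sum(1 for i in range(len(A)) if balanced(A[:i] + A[i+1:]))
-- ===== Notes on version B (the rewrite author's own statement) =====
-- stated objective: simpler
-- what changed: Replaces A's clever single-pass running-sum bookkeeping (four parity-tracked accumulators) by the direct brute-force definition: for each index build the list with that element removed and compare its even-position and odd-position sums.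
import Mathlib
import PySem

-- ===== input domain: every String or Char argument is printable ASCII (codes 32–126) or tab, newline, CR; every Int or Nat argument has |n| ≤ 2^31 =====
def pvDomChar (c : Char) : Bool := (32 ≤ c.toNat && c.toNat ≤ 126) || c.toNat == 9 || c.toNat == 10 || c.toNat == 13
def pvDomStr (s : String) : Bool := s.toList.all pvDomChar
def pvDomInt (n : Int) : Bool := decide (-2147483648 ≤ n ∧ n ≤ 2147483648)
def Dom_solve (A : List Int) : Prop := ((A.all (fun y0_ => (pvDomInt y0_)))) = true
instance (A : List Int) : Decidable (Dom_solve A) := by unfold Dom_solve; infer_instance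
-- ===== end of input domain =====

-- B replaces A's single-pass running-sum bookkeeping by the direct brute-force
-- definition: for each index, build the list with that element removed and
-- compare its even- and odd-position sums (objective: simpler, not faster).

-- ===== PORT A =====
-- first loop of A: accumulate (evenSum, oddSum) over indices
def solveLoop1 : List Int → Nat → Int → Int → Int × Int
  | [], _, e, o => (e, o)
  | a :: rest, i, e, o =>
    if i % 2 = 0 then solveLoop1 rest (i + 1) (e + a) o
    else solveLoop1 rest (i + 1) e (o + a)

-- second loop of A: state (Lodd, Leven, ans); the two branch-dependent updates
-- of Rodd/Reven and the final Leven/Lodd update are inlined per parity branch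
def solveLoop2 : List Int → Nat → Int → Int → Int → Int → Int → Int
  | [], _, _, _, _, _, ans => ans
  | a :: rest, i, eS, oS, Lodd, Leven, ans =>
    if i % 2 = 0 then
      solveLoop2 rest (i + 1) eS oS Lodd (Leven + a)
        (if Lodd + (eS - Leven - a) = Leven + (oS - Lodd) then ans + 1 else ans)
    else
      solveLoop2 rest (i + 1) eS oS (Lodd + a) Leven
        (if Lodd + (eS - Leven) = Leven + (oS - Lodd - a) then ans + 1 else ans)

def solve (A : List Int) : Int :=
  solveLoop2 A 0 (solveLoop1 A 0 0 0).1 (solveLoop1 A 0 0 0).2 0 0 0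

-- ===== PORT B =====
-- B[0::2] : every second element starting at position 0 (exact port of the
-- step-2 slice of Source B, written as the obvious two-step structural recursion)
def eo : List Int → List Int
  | [] => []
  | [a] => [a]
  | a :: _ :: r => a :: eo r

-- sum(B[0::2]) and sum(B[1::2])  (B[1::2] = every second element of B.drop 1)
def evenSumB (B : List Int) : Int := (eo B).sum
def oddSumB (B : List Int) : Int := (eo (B.drop 1)).sum

-- A[:i] + A[i+1:]  (slices with nonnegative in-range bounds = take/drop)
def removeAt (A : List Int) (i : Nat) : List Int := A.take i ++ A.drop (i + 1)

-- sum(1 for i in range(len(A)) if balanced(A[:i] + A[i+1:]))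
def solve_alt (A : List Int) : Int :=
  (List.range A.length).foldl
    (fun ans i => if evenSumB (removeAt A i) = oddSumB (removeAt A i) then ans + 1 else ans) 0

-- ===== PRECONDITION & SPEC =====
def Spec_solve (A : List Int) (out : Int) : Prop := out = solve_alt A
instance (A : List Int) (out : Int) : Decidable (Spec_solve A out) := by unfold Spec_solve; infer_instance

-- ===== CLAIM (what is proved, stated in full; the proofs are below) =====
def Claim_equal_solve : Prop := ∀ (A : List Int), Dom_solve A → Spec_solve A (solve A)

-- ===== LEMMAS AND PROOFS =====

-- proof helpers: alternating-sign sum and the abstract single pass A reduces to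
def sgnSum : List Int → Int
  | [] => 0
  | a :: r => a - sgnSum r

def signedList : List Int → Nat → List Int
  | [], _ => []
  | a :: rest, i => (if i % 2 = 0 then a else -a) :: signedList rest (i + 1)

def altLoop : List Int → Int → Int → Int → Int
  | [], _, _, ans => ans
  | s :: rest, total, p, ans =>
    altLoop rest total (p + s) (if 2 * p + s = total then ans + 1 else ans)

-- the per-index condition both counts are reduced to
def condA (A : List Int) (i : Nat) : Bool :=
  decide (2 * sgnSum (A.take i) + (if i % 2 = 0 then A.getD i 0 else -(A.getD i 0)) = sgnSum A)

-- A's totals minus each other equal the signed total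
lemma loop1_sub (l : List Int) : ∀ (i : Nat) (e o : Int),
    (solveLoop1 l i e o).1 - (solveLoop1 l i e o).2 = (e - o) + (signedList l i).sum := by
  induction l with
  | nil => intro i e o; simp [solveLoop1, signedList]
  | cons a rest ih =>
    intro i e o
    by_cases h : i % 2 = 0 <;>
      simp only [solveLoop1, signedList, h, if_true, if_false, List.sum_cons, ih] <;> ring

-- A's second loop simulates the abstract pass with p = Leven - Lodd, total = eS - oS
lemma loop2_eq (l : List Int) : ∀ (i : Nat) (eS oS Lodd Leven ans : Int),
    solveLoop2 l i eS oS Lodd Leven ans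
      = altLoop (signedList l i) (eS - oS) (Leven - Lodd) ans := by
  induction l with
  | nil => intro i eS oS Lodd Leven ans; rfl
  | cons a rest ih =>
    intro i eS oS Lodd Leven ans
    by_cases h : i % 2 = 0 <;>
      simp only [solveLoop2, signedList, altLoop, h, if_true, if_false, ih]
    · have hc : (Lodd + (eS - Leven - a) = Leven + (oS - Lodd))
          ↔ (2 * (Leven - Lodd) + a = eS - oS) := by omega
      rw [if_congr hc rfl rfl]; congr 1; ring
    · have hc : (Lodd + (eS - Leven) = Leven + (oS - Lodd - a))
          ↔ (2 * (Leven - Lodd) + -a = eS - oS) := by omega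
      rw [if_congr hc rfl rfl]; congr 1; ring

lemma signedList_sum (l : List Int) : ∀ i : Nat,
    (signedList l i).sum = if i % 2 = 0 then sgnSum l else -sgnSum l := by
  induction l with
  | nil => intro i; simp [signedList, sgnSum]
  | cons a r ih =>
    intro i
    by_cases h : i % 2 = 0
    · have h1 : (i + 1) % 2 = 1 := by omega
      simp [signedList, sgnSum, h, ih, h1]; ring
    · have h1 : (i + 1) % 2 = 0 := by omega
      simp [signedList, sgnSum, h, ih, h1]; ring

lemma eo_sum_cons (x : Int) (r : List Int) :
    (eo (x :: r)).sum = x + (eo (r.drop 1)).sum := by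
  cases r <;> simp [eo]

lemma eo_sub (l : List Int) : (eo l).sum - (eo (l.drop 1)).sum = sgnSum l := by
  induction l with
  | nil => simp [eo, sgnSum]
  | cons a r ih =>
    rw [eo_sum_cons]
    simp only [List.drop_one, List.tail_cons] at ih ⊢
    simp only [sgnSum]
    omega

lemma sgn_append (u v : List Int) :
    sgnSum (u ++ v) = sgnSum u + (if u.length % 2 = 0 then sgnSum v else -sgnSum v) := by
  induction u with
  | nil => simp [sgnSum]
  | cons a r ih =>
    by_cases h : r.length % 2 = 0
    · have h1 : (r.length + 1) % 2 = 1 := by omega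
      simp [sgnSum, ih, h, h1]; ring
    · have h1 : (r.length + 1) % 2 = 0 := by omega
      simp [sgnSum, ih, h, h1]; ring

-- removing index i turns the signed sum into 2*prefix + s_i - total
lemma sgn_removeAt (A : List Int) (i : Nat) (h : i < A.length) :
    sgnSum (removeAt A i)
      = 2 * sgnSum (A.take i) + (if i % 2 = 0 then A.getD i 0 else -(A.getD i 0)) - sgnSum A := by
  have hlen : (A.take i).length = i := by simp [List.length_take]; omega
  have hA : A = A.take i ++ A.drop i := (List.take_append_drop i A).symm
  have hd : A.drop i = A.getD i 0 :: A.drop (i + 1) := by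
    rw [List.getD_eq_getElem A 0 h]
    exact List.drop_eq_getElem_cons h
  have h1 : sgnSum A = sgnSum (A.take i)
      + (if i % 2 = 0 then A.getD i 0 - sgnSum (A.drop (i + 1))
         else -(A.getD i 0 - sgnSum (A.drop (i + 1)))) := by
    conv_lhs => rw [hA]
    rw [sgn_append, hlen, hd]
    simp [sgnSum]
  have h2 : sgnSum (removeAt A i) = sgnSum (A.take i)
      + (if i % 2 = 0 then sgnSum (A.drop (i + 1)) else -sgnSum (A.drop (i + 1))) := by
    rw [removeAt, sgn_append, hlen]
  by_cases hp : i % 2 = 0 <;> simp [hp] at h1 h2 ⊢ <;> omega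

-- the abstract pass counts the indices satisfying condA
lemma altLoop_count (A : List Int) : ∀ (n k : Nat) (ans : Int), A.length - k = n → k ≤ A.length →
    altLoop (signedList (A.drop k) k) (sgnSum A) (sgnSum (A.take k)) ans
      = ans + ((List.range' k n).countP (condA A) : Int) := by
  intro n
  induction n with
  | zero =>
    intro k ans hn hk
    have : A.drop k = [] := List.drop_eq_nil_of_le (by omega)
    simp [this, signedList, altLoop, List.range']
  | succ m ih =>
    intro k ans hn hk
    have hklt : k < A.length := by omega
    have hd : A.drop k = A.getD k 0 :: A.drop (k + 1) := by
      rw [List.getD_eq_getElem A 0 hklt]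
      exact List.drop_eq_getElem_cons hklt
    have htake : sgnSum (A.take (k + 1))
        = sgnSum (A.take k) + (if k % 2 = 0 then A.getD k 0 else -(A.getD k 0)) := by
      have ht : A.take (k + 1) = A.take k ++ [A.getD k 0] := by
        rw [List.getD_eq_getElem A 0 hklt, List.take_add_one]
        simp [List.getElem?_eq_getElem hklt]
      have hlen : (A.take k).length = k := by simp [List.length_take]; omega
      rw [ht, sgn_append, hlen]
      by_cases hp : k % 2 = 0 <;> simp [hp, sgnSum]
    rw [hd]
    simp only [signedList, altLoop]
    have hrange : List.range' k (m + 1) = k :: List.range' (k + 1) m := rfl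
    rw [hrange, List.countP_cons]
    by_cases hp : k % 2 = 0
    · simp only [hp, if_true]
      rw [show sgnSum (A.take k) + A.getD k 0 = sgnSum (A.take (k + 1)) by
        rw [htake]; simp [hp]]
      rw [ih (k + 1) _ (by omega) (by omega)]
      by_cases hc : 2 * sgnSum (A.take k) + A.getD k 0 = sgnSum A
      · have hb : condA A k = true := by
          unfold condA; rw [if_pos hp]; exact decide_eq_true hc
        rw [if_pos hc, hb]
        simp; omega
      · have hb : condA A k = false := by
          unfold condA; rw [if_pos hp]; exact decide_eq_false hc
        rw [if_neg hc, hb]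
        simp
    · simp only [hp, if_false]
      rw [show sgnSum (A.take k) + -(A.getD k 0) = sgnSum (A.take (k + 1)) by
        rw [htake]; simp [hp]]
      rw [ih (k + 1) _ (by omega) (by omega)]
      by_cases hc : 2 * sgnSum (A.take k) + -(A.getD k 0) = sgnSum A
      · have hb : condA A k = true := by
          unfold condA; rw [if_neg hp]; exact decide_eq_true hc
        rw [if_pos hc, hb]
        simp; omega
      · have hb : condA A k = false := by
          unfold condA; rw [if_neg hp]; exact decide_eq_false hc
        rw [if_neg hc, hb]
        simp

-- B's fold counts the indices where the removed list is balanced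
lemma foldl_count (A : List Int) : ∀ (l : List Nat) (ans : Int),
    l.foldl (fun a i => if evenSumB (removeAt A i) = oddSumB (removeAt A i) then a + 1 else a) ans
      = ans + (l.countP (fun i => decide (evenSumB (removeAt A i) = oddSumB (removeAt A i))) : Int) := by
  intro l
  induction l with
  | nil => intro ans; simp
  | cons x r ih =>
    intro ans
    simp only [List.foldl_cons, List.countP_cons, ih]
    by_cases h : evenSumB (removeAt A x) = oddSumB (removeAt A x)
    · simp only [h, if_pos, decide_true]
      push_cast; ring
    · simp [h]

-- the two per-index conditions agree for i < length
lemma cond_iff (A : List Int) (i : Nat) (h : i < A.length) :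
    (decide (evenSumB (removeAt A i) = oddSumB (removeAt A i))) = condA A i := by
  have hs : evenSumB (removeAt A i) - oddSumB (removeAt A i) = sgnSum (removeAt A i) :=
    eo_sub _
  have hr := sgn_removeAt A i h
  have hiff : (evenSumB (removeAt A i) = oddSumB (removeAt A i))
      ↔ (2 * sgnSum (A.take i) + (if i % 2 = 0 then A.getD i 0 else -(A.getD i 0)) = sgnSum A) := by
    constructor
    · intro hx; omega
    · intro hx; omega
  simp [condA, hiff]

-- ===== VERDICT (by name: the statement is the Claim_ definition above) =====
theorem solve_spec : Claim_equal_solve := by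
  intro A _
  unfold Spec_solve solve solve_alt
  rw [loop2_eq]
  have h1 := loop1_sub A 0 0 0
  rw [show (0:Int) - 0 + (signedList A 0).sum = (signedList A 0).sum by ring] at h1
  rw [h1, signedList_sum]
  simp only [Nat.zero_mod, if_true]
  have h0 : sgnSum (A.take 0) = 0 := by simp [sgnSum]
  have := altLoop_count A A.length 0 0 (by omega) (by omega)
  rw [List.drop_zero] at this
  rw [h0] at this
  rw [show (0:Int) - 0 = 0 by ring]
  rw [this, foldl_count]
  rw [List.range_eq_range']
  congr 2
  exact List.countP_congr (fun i hi => by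
    have : i < A.length := by
      have := List.mem_range'_1.mp hi; omega
    rw [cond_iff A i this])
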